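-- pv_equiv track=rewrite | github.com/pypi-data/pypi-mirror-304 | packages/base-decrypter/base_decrypter-0.1.0.tar.gz/base_decrypter-0.1.0/base_decryptor/decoders/base36_decoder.py | decode_base36
-- ===== SOURCE A (Python) =====
-- def decode_base36(encoded_string):
--     try:
--         # Ensure the input is treated as a string
--         encoded_string = encoded_string.replace(" ", "")  # Remove spaces if any
--         decoded_value = int(encoded_string, 36)  # Decode using base36
--
--         # Custom decoding back to text (assuming it represents ASCII characters)
--         decoded_string = ''
--         while decoded_value > 0:
--             decoded_string = chr(decoded_value % 256) + decoded_string
--             decoded_value //= 256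
--
--         # Return the type and decoded value
--         return "Base36", str(decoded_string)
--     except Exception as e:
--         return "Base36", f"Error: {str(e)}"
-- ===== SOURCE B (Python) =====
-- def decode_base36(encoded_string):
--     try:
--         value = int(encoded_string.replace(" ", ""), 36)
--     except Exception as e:
--         return "Base36", f"Error: {e}"
--     if value <= 0:
--         return "Base36", ""
--     nbytes = (value.bit_length() + 7) // 8
--     return "Base36", value.to_bytes(nbytes, "big").decode("latin-1")
-- ===== Notes on version B (the rewrite author's own statement) =====
-- stated objective: faster
-- what changed: The manual while-loop that extracts base-256 digits and prepends one chr() character at a time (quadratic string building) is replaced by an early-return structure with the closed-form conversion via int.bit_length and int.to_bytes decoded as latin-1 text; the try block now wraps only the parse.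
import Mathlib
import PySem

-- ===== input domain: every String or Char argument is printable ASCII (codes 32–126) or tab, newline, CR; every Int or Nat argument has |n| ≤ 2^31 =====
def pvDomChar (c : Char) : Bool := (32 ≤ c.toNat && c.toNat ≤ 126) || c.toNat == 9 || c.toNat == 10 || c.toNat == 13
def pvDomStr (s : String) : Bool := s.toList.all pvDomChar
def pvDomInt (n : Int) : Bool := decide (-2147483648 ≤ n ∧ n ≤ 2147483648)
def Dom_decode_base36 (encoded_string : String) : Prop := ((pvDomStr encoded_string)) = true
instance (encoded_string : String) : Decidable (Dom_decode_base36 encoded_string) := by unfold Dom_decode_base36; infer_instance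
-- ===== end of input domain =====

-- ===== PORT A =====
-- B replaces A's chr()-prepending while-loop by the closed-form to_bytes conversion (faster; same results).

-- the except-branch ValueError message "invalid literal for int() with base 36: <repr>".
-- repr of a str, exact for printable ASCII plus tab/newline/CR (the Dom character set).
def a_ReprChar (q : Char) (c : Char) : List Char :=
  if c = '\\' then ['\\', '\\']
  else if c = q then ['\\', q]
  else if c = '\t' then ['\\', 't']
  else if c = '\n' then ['\\', 'n']
  else if c = '\r' then ['\\', 'r']
  else [c]

def a_ReprStr (s : String) : String :=
  let cs := s.toList
  let q : Char := if cs.contains '\'' && !cs.contains '"' then '"' else '\''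
  String.ofList (q :: cs.flatMap (a_ReprChar q) ++ [q])

def a_ErrMsg (s : String) : String :=
  "Error: invalid literal for int() with base 36: " ++ a_ReprStr s

-- A's while-loop: "while v > 0: s = chr(v % 256) + s; v //= 256".  The loop value is an
-- int that is positive throughout, so it is carried as a Nat (v.toNat at entry: 0 for
-- v ≤ 0, i.e. zero iterations, exactly as in Python); // and % by 256 on a nonnegative
-- int are Nat / and %.
def a_loop (n : Nat) (acc : List Char) : List Char :=
  if n = 0 then acc
  else a_loop (n / 256) (Char.ofNat (n % 256) :: acc)
decreasing_by exact Nat.div_lt_self (Nat.pos_of_ne_zero (by assumption)) (by norm_num)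

def decode_base36 (encoded_string : String) : String × String :=
  let s := PySem.Str.replace encoded_string " " ""
  match PySem.Int.ofStrBase? s 36 with
  | none => ("Base36", a_ErrMsg s)
  | some v => ("Base36", String.ofList (a_loop v.toNat []))

-- ===== PORT B =====
-- B's except branch is the same "Error: {e}" Python as A's, but its repr is transliterated
-- here as a foldr over an escape TABLE rather than a per-character if-chain.
def b_EscTable : List (Char × List Char) :=
  [('\\', ['\\', '\\']), ('\t', ['\\', 't']), ('\n', ['\\', 'n']), ('\r', ['\\', 'r'])]

def b_Quote (cs : List Char) : Char :=
  if cs.contains '\'' && !cs.contains '"' then '"' else '\''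

def b_Repr (s : String) : List Char :=
  let cs := s.toList
  let q := b_Quote cs
  q :: cs.foldr (fun c acc =>
    (if c = q then ['\\', q] else ((b_EscTable.lookup c).getD [c])) ++ acc) [q]

-- port of "value.to_bytes((value.bit_length() + 7) // 8, 'big').decode('latin-1')":
-- the nbytes-many big-endian bytes of n, each read as the latin-1 char of its value.
def bLen (n : Nat) : Nat := (PySem.Int.bitLength (n : Int) + 7) / 8

def b_bytes (n : Nat) : List Char :=
  (List.range (bLen n)).map (fun i => Char.ofNat ((n >>> (8 * (bLen n - 1 - i))) % 256))

def decode_base36_alt (encoded_string : String) : String × String :=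
  match PySem.Int.ofStrBase? (PySem.Str.replace encoded_string " " "") 36 with
  | none =>
      ("Base36", "Error: invalid literal for int() with base 36: "
        ++ String.ofList (b_Repr (PySem.Str.replace encoded_string " " "")))
  | some v =>
      if v ≤ 0 then ("Base36", "")
      else ("Base36", String.ofList (b_bytes v.toNat))

-- ===== PRECONDITION & SPEC =====
def Spec_decode_base36 (encoded_string : String) (out : String × String) : Prop := out = decode_base36_alt encoded_string
instance (encoded_string : String) (out : String × String) : Decidable (Spec_decode_base36 encoded_string out) := by unfold Spec_decode_base36; infer_instance

-- ===== CLAIM (what is proved, stated in full; the proofs are below) =====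
def Claim_equal_decode_base36 : Prop := ∀ (encoded_string : String), Dom_decode_base36 encoded_string → Spec_decode_base36 encoded_string (decode_base36 encoded_string)

-- ===== LEMMAS AND PROOFS =====

lemma lookup_none (c : Char) (h1 : c ≠ '\\') (h2 : c ≠ '\t') (h3 : c ≠ '\n') (h4 : c ≠ '\r') :
    b_EscTable.lookup c = none := by
  have b1 : (c == '\\') = false := by simpa using h1
  have b2 : (c == '\t') = false := by simpa using h2
  have b3 : (c == '\n') = false := by simpa using h3
  have b4 : (c == '\r') = false := by simpa using h4
  simp [b_EscTable, List.lookup, b1, b2, b3, b4]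

lemma reprChar_eq (q c : Char) (hq : q = '\'' ∨ q = '"') :
    a_ReprChar q c = (if c = q then ['\\', q] else ((b_EscTable.lookup c).getD [c])) := by
  have hqe : ∀ d : Char, d = '\\' ∨ d = '\t' ∨ d = '\n' ∨ d = '\r' → ¬ d = q := by
    intro d hd
    rcases hq with h | h <;> subst h <;> rcases hd with h | h | h | h <;> subst h <;> decide
  unfold a_ReprChar
  by_cases h1 : c = '\\'
  · subst h1
    simp [hqe _ (Or.inl rfl), show b_EscTable.lookup '\\' = some ['\\', '\\'] from rfl]
  by_cases h2 : c = '\t'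
  · subst h2
    simp [h1, hqe _ (Or.inr (Or.inl rfl)),
      show b_EscTable.lookup '\t' = some ['\\', 't'] from rfl]
  by_cases h3 : c = '\n'
  · subst h3
    simp [h1, h2, hqe _ (Or.inr (Or.inr (Or.inl rfl))),
      show b_EscTable.lookup '\n' = some ['\\', 'n'] from rfl]
  by_cases h4 : c = '\r'
  · subst h4
    simp [h1, h2, h3, hqe _ (Or.inr (Or.inr (Or.inr rfl))),
      show b_EscTable.lookup '\r' = some ['\\', 'r'] from rfl]
  by_cases h5 : c = q
  · simp [h5]
    exact fun h => h.symm
  · simp [h1, h2, h3, h4, h5, lookup_none c h1 h2 h3 h4]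

lemma foldr_append_eq_flatMap {α β : Type} (f : α → List β) (tail : List β) :
    ∀ (cs : List α), cs.foldr (fun c acc => f c ++ acc) tail = cs.flatMap f ++ tail := by
  intro cs
  induction cs with
  | nil => simp
  | cons c cs ih => simp [ih]

lemma flatMap_repr (q : Char) (hq : q = '\'' ∨ q = '"') :
    ∀ (cs : List Char), cs.flatMap (a_ReprChar q)
      = cs.flatMap (fun c => if c = q then ['\\', q] else ((b_EscTable.lookup c).getD [c])) := by
  intro cs
  induction cs with
  | nil => rfl
  | cons c cs ih => simp only [List.flatMap_cons, reprChar_eq q c hq, ih]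

lemma repr_eq (s : String) : a_ReprStr s = String.ofList (b_Repr s) := by
  unfold a_ReprStr b_Repr
  have hq : b_Quote s.toList = '\'' ∨ b_Quote s.toList = '"' := by
    unfold b_Quote; split_ifs <;> simp
  have hqdef : (if s.toList.contains '\'' && !s.toList.contains '"' then '"' else '\'')
      = b_Quote s.toList := rfl
  simp only [hqdef, foldr_append_eq_flatMap, flatMap_repr _ hq, List.cons_append]

lemma bLen_bounds (n : Nat) (hn : n ≠ 0) : 256 ^ (bLen n - 1) ≤ n ∧ n < 256 ^ bLen n := by
  have h1 : n < 2 ^ PySem.Int.bitLength (n : Int) := by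
    have := PySem.Int.lt_two_pow_bitLength (n : Int)
    simpa using this
  have h2 : 2 ^ (PySem.Int.bitLength (n : Int) - 1) ≤ n := by
    have := PySem.Int.two_pow_bitLength_le (n : Int) (by exact_mod_cast hn)
    simpa using this
  have hs : 1 ≤ PySem.Int.bitLength (n : Int) := by
    by_contra h
    have : PySem.Int.bitLength (n : Int) = 0 := by omega
    rw [this] at h1; omega
  constructor
  · calc 256 ^ (bLen n - 1) = 2 ^ (8 * (bLen n - 1)) := by norm_num [pow_mul]
    _ ≤ 2 ^ (PySem.Int.bitLength (n : Int) - 1) := by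
        apply Nat.pow_le_pow_right (by norm_num)
        unfold bLen; omega
    _ ≤ n := h2
  · calc n < 2 ^ PySem.Int.bitLength (n : Int) := h1
    _ ≤ 2 ^ (8 * bLen n) := by
        apply Nat.pow_le_pow_right (by norm_num)
        unfold bLen; omega
    _ = 256 ^ bLen n := by norm_num [pow_mul]

lemma bLen_div (n : Nat) (hn : n ≠ 0) : bLen (n / 256) = bLen n - 1 := by
  obtain ⟨hlo, hhi⟩ := bLen_bounds n hn
  by_cases hsmall : n < 256
  · have h0 : n / 256 = 0 := Nat.div_eq_of_lt hsmall
    have h1 : bLen n = 1 := by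
      have : ¬ 2 ≤ bLen n := by
        intro h2
        have : 256 ^ 1 ≤ 256 ^ (bLen n - 1) := Nat.pow_le_pow_right (by norm_num) (by omega)
        omega
      have : 1 ≤ bLen n := by
        by_contra h
        have hb : bLen n = 0 := by omega
        rw [hb] at hhi; simp at hhi; omega
      omega
    rw [h0, h1]
    rfl
  · rw [not_lt] at hsmall
    have hm : n / 256 ≠ 0 := by
      have : 1 ≤ n / 256 := (Nat.one_le_div_iff (by norm_num)).mpr hsmall
      omega
    have hk2 : 2 ≤ bLen n := by
      by_contra h
      have hb : bLen n ≤ 1 := by omega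
      have : 256 ^ bLen n ≤ 256 ^ 1 := Nat.pow_le_pow_right (by norm_num) hb
      simp at this; omega
    obtain ⟨mlo, mhi⟩ := bLen_bounds (n / 256) hm
    have d_lo : 256 ^ (bLen n - 2) ≤ n / 256 := by
      rw [Nat.le_div_iff_mul_le (by norm_num)]
      calc 256 ^ (bLen n - 2) * 256 = 256 ^ (bLen n - 2 + 1) := by rw [pow_succ]
      _ = 256 ^ (bLen n - 1) := by congr 1; omega
      _ ≤ n := hlo
    have d_hi : n / 256 < 256 ^ (bLen n - 1) := by
      rw [Nat.div_lt_iff_lt_mul (by norm_num)]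
      calc n < 256 ^ bLen n := hhi
      _ = 256 ^ (bLen n - 1) * 256 := by rw [← pow_succ]; congr 1; omega
    have e1 : bLen (n / 256) - 1 < bLen n - 1 := by
      by_contra h
      rw [not_lt] at h
      have : 256 ^ (bLen n - 1) ≤ 256 ^ (bLen (n / 256) - 1) := Nat.pow_le_pow_right (by norm_num) h
      omega
    have e2 : bLen n - 2 < bLen (n / 256) := by
      by_contra h
      rw [not_lt] at h
      have : 256 ^ (bLen (n / 256)) ≤ 256 ^ (bLen n - 2) := Nat.pow_le_pow_right (by norm_num) h
      omega
    omega

lemma b_bytes_zero : b_bytes 0 = [] := rfl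

lemma b_bytes_succ (n : Nat) (hn : n ≠ 0) :
    b_bytes n = b_bytes (n / 256) ++ [Char.ofNat (n % 256)] := by
  have hk : 1 ≤ bLen n := by
    obtain ⟨_, hhi⟩ := bLen_bounds n hn
    by_contra h
    have hb : bLen n = 0 := by omega
    rw [hb] at hhi; simp at hhi; omega
  show (List.range (bLen n)).map _ = (List.range (bLen (n / 256))).map _ ++ _
  rw [bLen_div n hn]
  have hrange : List.range (bLen n) = List.range (bLen n - 1) ++ [bLen n - 1] := by
    conv_lhs => rw [show bLen n = (bLen n - 1) + 1 by omega]
    exact List.range_succ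
  rw [hrange, List.map_append, List.map_cons, List.map_nil]
  congr 1
  · apply List.map_congr_left
    intro i hi
    have hi' : i < bLen n - 1 := List.mem_range.mp hi
    have harith : 8 * (bLen n - 1 - i) = 8 + 8 * (bLen n - 1 - 1 - i) := by omega
    have h8 : n >>> 8 = n / 256 := by rw [Nat.shiftRight_eq_div_pow]
    rw [harith, Nat.shiftRight_add, h8]
  · have : bLen n - 1 - (bLen n - 1) = 0 := by omega
    rw [this]
    simp [Nat.shiftRight_zero]

lemma a_loop_eq (n : Nat) : ∀ acc, a_loop n acc = b_bytes n ++ acc := by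
  induction n using Nat.strong_induction_on with
  | _ n ih =>
    intro acc
    rw [a_loop]
    by_cases h : n = 0
    · simp [h, b_bytes_zero]
    · rw [if_neg h, ih (n / 256) (Nat.div_lt_self (Nat.pos_of_ne_zero h) (by norm_num)),
         b_bytes_succ n h, List.append_assoc]
      rfl

-- ===== VERDICT (by name: the statement is the Claim_ definition above) =====
theorem decode_base36_spec : Claim_equal_decode_base36 := by
  intro s _
  show decode_base36 s = decode_base36_alt s
  simp only [decode_base36, decode_base36_alt]
  cases PySem.Int.ofStrBase? (PySem.Str.replace s " " "") 36 with
  | none => simp [a_ErrMsg, repr_eq]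
  | some v =>
    dsimp only
    rw [a_loop_eq v.toNat [], List.append_nil]
    by_cases hv : v ≤ 0
    · rw [if_pos hv]
      have hz : v.toNat = 0 := by omega
      simp [hz, b_bytes_zero]
    · rw [if_neg hv]
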